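-- pv_equiv track=rewrite | github.com/sunghj1118/applegame | applegame.py | find_rectangles
-- ===== SOURCE A (Python) =====
-- def find_rectangles(grid, target_sum=10):
--     rows = len(grid)
--     cols = len(grid[0])
--     valid_rectangles = []
--
--     for height in range(1, rows + 1):
--         for width in range(1, cols + 1):
--             for row in range(rows - height + 1):
--                 for col in range(cols - width + 1):
--                     if rectangle_sum(grid, row, col, height, width) == target_sum:
--                         valid_rectangles.append((row, col, height, width))
--
--     return valid_rectangles
--
-- def rectangle_sum(grid, top_row, left_col, height, width):
--     return sum(grid[r][c] for r in range(top_row, top_row + height) for c in range(left_col, left_col + width))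
-- ===== SOURCE B (Python) =====
-- def find_rectangles(grid, target_sum=10):
--     rows = len(grid)
--     cols = len(grid[0])
--     # 2D prefix sums: pref[i][j] = sum of grid[r][c] for r < i, c < j
--     prev = [0] * (cols + 1)
--     pref = [prev]
--     for r in grid:
--         run = 0
--         cur = [0]
--         for j in range(cols):
--             run += r[j]
--             cur.append(prev[j + 1] + run)
--         pref.append(cur)
--         prev = cur
--     valid_rectangles = []
--     for height in range(1, rows + 1):
--         for width in range(1, cols + 1):
--             for row in range(rows - height + 1):
--                 for col in range(cols - width + 1):
--                     s = (pref[row + height][col + width] - pref[row][col + width]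
--                          - pref[row + height][col] + pref[row][col])
--                     if s == target_sum:
--                         valid_rectangles.append((row, col, height, width))
--     return valid_rectangles
-- ===== Notes on version B (the rewrite author's own statement) =====
-- stated objective: faster
-- what changed: B builds a 2D prefix-sum table once so each candidate rectangle's sum is four O(1) table lookups instead of A's per-rectangle height*width re-summation.
import Mathlib
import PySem

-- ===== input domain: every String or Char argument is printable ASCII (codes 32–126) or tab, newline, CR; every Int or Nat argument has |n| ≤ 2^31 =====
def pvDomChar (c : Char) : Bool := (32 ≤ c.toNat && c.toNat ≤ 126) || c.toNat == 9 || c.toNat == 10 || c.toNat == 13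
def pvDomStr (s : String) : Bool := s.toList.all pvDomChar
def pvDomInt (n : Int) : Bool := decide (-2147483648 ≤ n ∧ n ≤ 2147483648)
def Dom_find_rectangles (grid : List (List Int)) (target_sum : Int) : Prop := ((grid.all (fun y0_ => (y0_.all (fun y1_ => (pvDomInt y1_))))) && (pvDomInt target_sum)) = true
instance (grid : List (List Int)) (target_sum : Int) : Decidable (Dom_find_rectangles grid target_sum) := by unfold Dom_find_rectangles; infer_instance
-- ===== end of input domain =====

-- B replaces A's per-rectangle re-summation by a 2D prefix-sum table, so each candidate
-- rectangle's sum is four table lookups instead of a height×width scan (return value only; no mutation).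

-- ===== PORT A =====
-- grid[r][c]: pyGetD is exact for the in-range indices that occur under Pre_ (Python raises otherwise)
def rectangle_sum (grid : List (List Int)) (top_row left_col height width : Int) : Int :=
  (PySem.List.pyRange top_row (top_row + height) 1).foldl
    (fun s r =>
      (PySem.List.pyRange left_col (left_col + width) 1).foldl
        (fun s c => s + PySem.List.pyGetD (PySem.List.pyGetD grid r []) c 0) s)
    0

def find_rectangles (grid : List (List Int)) (target_sum : Int) : List (Int × Int × Int × Int) :=
  let rows : Int := grid.length
  let cols : Int := (PySem.List.pyGetD grid 0 []).length
  (PySem.List.pyRange 1 (rows + 1) 1).foldl (fun acc height =>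
    (PySem.List.pyRange 1 (cols + 1) 1).foldl (fun acc width =>
      (PySem.List.pyRange 0 (rows - height + 1) 1).foldl (fun acc row =>
        (PySem.List.pyRange 0 (cols - width + 1) 1).foldl (fun acc col =>
          if rectangle_sum grid row col height width = target_sum
          then acc ++ [(row, col, height, width)] else acc) acc) acc) acc) []

-- ===== PORT B =====
-- inner loop of Source B: run += r[j]; cur.append(prev[j+1] + run)
def pvPrefRow (prev r : List Int) (cols : Int) : List Int :=
  ((PySem.List.pyRange 0 cols 1).foldl
    (fun (st : Int × List Int) j =>
      let run := st.1 + PySem.List.pyGetD r j 0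
      (run, st.2 ++ [PySem.List.pyGetD prev (j + 1) 0 + run]))
    (0, [0])).2

-- outer loop of Source B: state = (pref, prev); pref.append(cur); prev = cur
def pvPref (grid : List (List Int)) (cols : Int) : List (List Int) :=
  (grid.foldl (fun (st : List (List Int) × List Int) r =>
      let cur := pvPrefRow st.2 r cols
      (st.1 ++ [cur], cur))
    ([List.replicate (cols + 1).toNat 0], List.replicate (cols + 1).toNat 0)).1

def find_rectangles_alt (grid : List (List Int)) (target_sum : Int) : List (Int × Int × Int × Int) :=
  let rows : Int := grid.length
  let cols : Int := (PySem.List.pyGetD grid 0 []).length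
  let pref := pvPref grid cols
  (PySem.List.pyRange 1 (rows + 1) 1).foldl (fun acc height =>
    (PySem.List.pyRange 1 (cols + 1) 1).foldl (fun acc width =>
      (PySem.List.pyRange 0 (rows - height + 1) 1).foldl (fun acc row =>
        (PySem.List.pyRange 0 (cols - width + 1) 1).foldl (fun acc col =>
          if PySem.List.pyGetD (PySem.List.pyGetD pref (row + height) []) (col + width) 0
             - PySem.List.pyGetD (PySem.List.pyGetD pref row []) (col + width) 0
             - PySem.List.pyGetD (PySem.List.pyGetD pref (row + height) []) col 0
             + PySem.List.pyGetD (PySem.List.pyGetD pref row []) col 0 = target_sum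
          then acc ++ [(row, col, height, width)] else acc) acc) acc) acc) []

-- ===== PRECONDITION & SPEC =====
-- Pre_ excludes exactly the inputs where the Python A raises: the empty grid (grid[0] is an
-- IndexError) and grids in which some row is shorter than row 0 (rectangle_sum's grid[r][c] raises).
def Pre_find_rectangles (grid : List (List Int)) (target_sum : Int) : Prop :=
  grid ≠ [] ∧ ∀ r ∈ grid, (grid.headD []).length ≤ r.length
instance (grid : List (List Int)) (target_sum : Int) : Decidable (Pre_find_rectangles grid target_sum) := by unfold Pre_find_rectangles; infer_instance

def pvWitness_find_rectangles : List (List Int) × Int := ([[3, 7], [5, 5]], 10)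

def Spec_find_rectangles (grid : List (List Int)) (target_sum : Int) (out : List (Int × Int × Int × Int)) : Prop := out = find_rectangles_alt grid target_sum
instance (grid : List (List Int)) (target_sum : Int) (out : List (Int × Int × Int × Int)) : Decidable (Spec_find_rectangles grid target_sum out) := by unfold Spec_find_rectangles; infer_instance

-- ===== CLAIM (what is proved, stated in full; the proofs are below) =====
def Claim_equal_find_rectangles : Prop := ∀ (grid : List (List Int)) (target_sum : Int), Dom_find_rectangles grid target_sum → Pre_find_rectangles grid target_sum → Spec_find_rectangles grid target_sum (find_rectangles grid target_sum)

-- ===== LEMMAS AND PROOFS =====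

-- the cell grid[r][c] read as 0 when out of range, Nat indices
def pvCell (g : List (List Int)) (r c : Nat) : Int := (g.getD r []).getD c 0

-- sum of the first m entries of a row (missing entries read as 0)
def pvRowSum (r : List Int) (m : Nat) : Int := ((List.range m).map (fun c => r.getD c 0)).sum

-- the mathematical 2D prefix sum
def pvS (g : List (List Int)) (i j : Nat) : Int :=
  ((List.range i).map (fun rr => pvRowSum (g.getD rr []) j)).sum

def pvRowSpec (g : List (List Int)) (cols i : Nat) : List Int :=
  (List.range (cols + 1)).map (fun j => pvS g i j)

lemma pvRowSum_succ (r : List Int) (m : Nat) :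
    pvRowSum r (m + 1) = pvRowSum r m + r.getD m 0 := by
  simp [pvRowSum, List.range_succ]

lemma pvS_succ (g : List (List Int)) (i j : Nat) :
    pvS g (i + 1) j = pvS g i j + pvRowSum (g.getD i []) j := by
  simp [pvS, List.range_succ]

lemma pvS_zero_right (g : List (List Int)) (i : Nat) : pvS g i 0 = 0 := by
  simp [pvS, pvRowSum]

lemma prefRow_fold (prev r : List Int) (n : Nat) :
    ((PySem.List.pyRange 0 (n : Int) 1).foldl
      (fun (st : Int × List Int) j =>
        let run := st.1 + PySem.List.pyGetD r j 0
        (run, st.2 ++ [PySem.List.pyGetD prev (j + 1) 0 + run]))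
      (0, [0]))
    = (pvRowSum r n,
       0 :: (List.range n).map (fun j => prev.getD (j + 1) 0 + pvRowSum r (j + 1))) := by
  induction n with
  | zero =>
    rw [show ((0 : Nat) : Int) = 0 from rfl, PySem.List.pyRange_one_eq_nil (by omega)]
    simp [pvRowSum]
  | succ n ih =>
    have h : ((n + 1 : Nat) : Int) = (n : Int) + 1 := by push_cast; ring
    rw [h, PySem.List.pyRange_one_succ_right (by omega), List.foldl_append, ih]
    simp only [List.foldl_cons, List.foldl_nil]
    rw [PySem.List.pyGetD_of_nonneg r 0 (by omega),
        PySem.List.pyGetD_of_nonneg prev 0 (by omega),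
        show ((n : Int)).toNat = n by omega, show ((n : Int) + 1).toNat = n + 1 by omega,
        ← pvRowSum_succ, List.range_succ, List.map_append]
    simp

lemma prefRow_eq (prev r : List Int) (n : Nat) :
    pvPrefRow prev r (n : Int)
      = 0 :: (List.range n).map (fun j => prev.getD (j + 1) 0 + pvRowSum r (j + 1)) := by
  unfold pvPrefRow
  rw [prefRow_fold]

lemma pvRowSpec_getD (g : List (List Int)) (cols i j : Nat) (hj : j < cols + 1) :
    (pvRowSpec g cols i).getD j 0 = pvS g i j := by
  unfold pvRowSpec
  rw [List.getD_eq_getElem?_getD]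
  simp [hj]

lemma prefRow_step (g : List (List Int)) (cols i : Nat) :
    pvPrefRow (pvRowSpec g cols i) (g.getD i []) (cols : Int) = pvRowSpec g cols (i + 1) := by
  rw [prefRow_eq]
  conv_rhs => unfold pvRowSpec
  rw [List.range_succ_eq_map]
  simp only [List.map_cons, List.map_map]
  congr 1
  · simp [pvS_zero_right]
  · apply List.map_congr_left
    intro j hj
    have hjlt : j < cols := List.mem_range.mp hj
    simp only [Function.comp_apply]
    rw [pvRowSpec_getD g cols i (j + 1) (by omega)]
    rw [show Nat.succ j = j + 1 from rfl, pvS_succ]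

lemma pref_fold (g : List (List Int)) : ∀ (G : List (List Int)) (cols i : Nat)
    (acc : List (List Int)), g = G.drop i →
    ((g.foldl (fun (st : List (List Int) × List Int) r =>
        let cur := pvPrefRow st.2 r (cols : Int)
        (st.1 ++ [cur], cur)) (acc, pvRowSpec G cols i)).1
      = acc ++ (List.range' (i + 1) (G.length - i)).map (pvRowSpec G cols)) := by
  induction g with
  | nil =>
    intro G cols i acc hg
    have hlen : G.length - i = 0 := by
      have := congrArg List.length hg
      simpa using this.symm
    simp [hlen]
  | cons r g ih =>
    intro G cols i acc hg
    have hi : i < G.length := by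
      by_contra h
      rw [List.drop_eq_nil_of_le (by omega)] at hg; simp at hg
    have hdrop := List.drop_eq_getElem_cons (l := G) hi
    injection hg.trans hdrop with hr hg'
    have hgetD : G.getD i [] = G[i] := List.getD_eq_getElem G [] hi
    simp only [List.foldl_cons]
    rw [show pvPrefRow (pvRowSpec G cols i) r (cols : Int) = pvRowSpec G cols (i + 1) by
      rw [hr, ← hgetD]; exact prefRow_step G cols i]
    rw [ih G cols (i + 1) (acc ++ [pvRowSpec G cols (i + 1)]) hg']
    rw [List.append_assoc]
    congr 1
    rw [show G.length - i = (G.length - (i + 1)) + 1 by omega, List.range'_succ]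
    simp

lemma pvRowSpec_zero (g : List (List Int)) (cols : Nat) :
    List.replicate (cols + 1) (0 : Int) = pvRowSpec g cols 0 := by
  symm
  rw [List.eq_replicate_iff]
  refine ⟨by simp [pvRowSpec], ?_⟩
  intro b hb
  obtain ⟨j, _, hj⟩ := List.mem_map.mp hb
  simp [pvS, ← hj]

lemma pvPref_eq (g : List (List Int)) (cols : Nat) :
    pvPref g (cols : Int) = (List.range (g.length + 1)).map (pvRowSpec g cols) := by
  unfold pvPref
  have hc : ((cols : Int) + 1).toNat = cols + 1 := by omega
  rw [hc, pvRowSpec_zero g cols,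
    pref_fold g g cols 0 [pvRowSpec g cols 0] (by simp)]
  rw [List.range_succ_eq_map]
  simp only [List.map_cons, List.map_map, Nat.sub_zero, List.singleton_append]
  congr 1
  rw [List.range'_eq_map_range, List.map_map]
  apply List.map_congr_left
  intro k _
  simp only [Function.comp_apply]
  rw [Nat.add_comm]

lemma pvPref_getD (g : List (List Int)) (cols i j : Nat)
    (hi : i ≤ g.length) (hj : j ≤ cols) :
    PySem.List.pyGetD (PySem.List.pyGetD (pvPref g (cols : Int)) (i : Int) []) (j : Int) 0
      = pvS g i j := by
  rw [PySem.List.pyGetD_natCast, PySem.List.pyGetD_natCast, pvPref_eq]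
  rw [show ((List.range (g.length + 1)).map (pvRowSpec g cols)).getD i [] = pvRowSpec g cols i from by
    rw [List.getD_eq_getElem?_getD]
    simp [List.getElem?_range (show i < g.length + 1 by omega)]]
  exact pvRowSpec_getD g cols i j (by omega)

lemma sum_map_sub (l : List Nat) (f h : Nat → Int) :
    (l.map (fun x => f x - h x)).sum = (l.map f).sum - (l.map h).sum := by
  induction l with
  | nil => simp
  | cons x t ih => simp [ih]; ring

lemma pvS_split (g : List (List Int)) (a h j : Nat) :
    pvS g (a + h) j - pvS g a j
      = ((List.range h).map (fun k => pvRowSum (g.getD (a + k) []) j)).sum := by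
  unfold pvS
  rw [List.range_add, List.map_append, List.sum_append, List.map_map]
  simp only [add_sub_cancel_left]
  rfl

lemma pvRowSum_split (r : List Int) (b w : Nat) :
    pvRowSum r (b + w) - pvRowSum r b
      = ((List.range w).map (fun m => r.getD (b + m) 0)).sum := by
  unfold pvRowSum
  rw [List.range_add, List.map_append, List.sum_append, List.map_map]
  simp only [add_sub_cancel_left]
  rfl

lemma sum_pyRange (f : Int → Int) (a : Int) (n : Nat) (init : Int) :
    (PySem.List.pyRange a (a + (n : Int)) 1).foldl (fun s x => s + f x) init
      = init + ((List.range n).map (fun (k : Nat) => f (a + (k : Int)))).sum := by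
  rw [PySem.List.foldl_add, PySem.List.pyRange_one, List.map_map]
  have hn : ((a + (n : Int)) - a).toNat = n := by omega
  rw [hn]
  rfl

lemma rect_eq (g : List (List Int)) (a b h w : Nat) :
    rectangle_sum g (a : Int) (b : Int) (h : Int) (w : Int)
      = ((List.range h).map (fun k =>
          ((List.range w).map (fun m => pvCell g (a + k) (b + m))).sum)).sum := by
  unfold rectangle_sum
  trans ((PySem.List.pyRange (a : Int) ((a : Int) + (h : Int)) 1).foldl
    (fun (s r : Int) => s +
      ((List.range w).map (fun (m : Nat) =>
        PySem.List.pyGetD (PySem.List.pyGetD g r []) ((b : Int) + (m : Int)) 0)).sum) 0)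
  · exact PySem.List.foldl_congr_mem _ _ _ _ (fun s r _ =>
      sum_pyRange (fun c => PySem.List.pyGetD (PySem.List.pyGetD g r []) c 0) (b : Int) w s)
  · rw [sum_pyRange _ (a : Int) h 0, zero_add]
    apply congrArg
    apply List.map_congr_left
    intro k _
    apply congrArg
    apply List.map_congr_left
    intro m _
    rw [show (a : Int) + (k : Int) = ((a + k : Nat) : Int) by push_cast; ring,
        show (b : Int) + (m : Int) = ((b + m : Nat) : Int) by push_cast; ring,
        PySem.List.pyGetD_natCast, PySem.List.pyGetD_natCast]
    rfl

lemma key_eq (g : List (List Int)) (cols a b h w : Nat)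
    (hh : a + h ≤ g.length) (hw : b + w ≤ cols) :
    PySem.List.pyGetD (PySem.List.pyGetD (pvPref g (cols : Int)) ((a : Int) + (h : Int)) []) ((b : Int) + (w : Int)) 0
      - PySem.List.pyGetD (PySem.List.pyGetD (pvPref g (cols : Int)) (a : Int) []) ((b : Int) + (w : Int)) 0
      - PySem.List.pyGetD (PySem.List.pyGetD (pvPref g (cols : Int)) ((a : Int) + (h : Int)) []) (b : Int) 0
      + PySem.List.pyGetD (PySem.List.pyGetD (pvPref g (cols : Int)) (a : Int) []) (b : Int) 0
      = rectangle_sum g (a : Int) (b : Int) (h : Int) (w : Int) := by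
  rw [show (a : Int) + (h : Int) = ((a + h : Nat) : Int) by push_cast; ring,
      show (b : Int) + (w : Int) = ((b + w : Nat) : Int) by push_cast; ring]
  rw [pvPref_getD g cols (a + h) (b + w) hh hw,
      pvPref_getD g cols a (b + w) (by omega) hw,
      pvPref_getD g cols (a + h) b hh (by omega),
      pvPref_getD g cols a b (by omega) (by omega),
      rect_eq]
  rw [show pvS g (a + h) (b + w) - pvS g a (b + w) - pvS g (a + h) b + pvS g a b
      = (pvS g (a + h) (b + w) - pvS g a (b + w)) - (pvS g (a + h) b - pvS g a b) from by ring,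
      pvS_split, pvS_split, ← sum_map_sub]
  apply congrArg
  apply List.map_congr_left
  intro k _
  rw [pvRowSum_split]
  rfl

-- ===== VERDICT (by name: the statement is the Claim_ definition above) =====
theorem find_rectangles_spec : Claim_equal_find_rectangles := by
  intro grid target_sum _hdom _hpre
  unfold Spec_find_rectangles
  simp only [find_rectangles, find_rectangles_alt]
  apply PySem.List.foldl_congr_mem
  intro acc height hmem1
  apply PySem.List.foldl_congr_mem
  intro acc2 width hmem2
  apply PySem.List.foldl_congr_mem
  intro acc3 row hmem3
  apply PySem.List.foldl_congr_mem
  intro acc4 col hmem4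
  obtain ⟨hh1, hh2⟩ := (PySem.List.mem_pyRange_one).mp hmem1
  obtain ⟨hw1, hw2⟩ := (PySem.List.mem_pyRange_one).mp hmem2
  obtain ⟨hr1, hr2⟩ := (PySem.List.mem_pyRange_one).mp hmem3
  obtain ⟨hc1, hc2⟩ := (PySem.List.mem_pyRange_one).mp hmem4
  rw [show row = ((row.toNat : Nat) : Int) from (Int.toNat_of_nonneg hr1).symm,
      show col = ((col.toNat : Nat) : Int) from (Int.toNat_of_nonneg hc1).symm,
      show height = ((height.toNat : Nat) : Int) from (Int.toNat_of_nonneg (by omega)).symm,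
      show width = ((width.toNat : Nat) : Int) from (Int.toNat_of_nonneg (by omega)).symm]
  rw [← key_eq grid (PySem.List.pyGetD grid 0 []).length row.toNat col.toNat
      height.toNat width.toNat (by omega) (by omega)]
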